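-- pv_equiv track=rewrite | github.com/zer0int/CLIP-fine-tune | ft-A-clip-interrogator-csv-to-json-labels.py | process_clip_opinions
-- ===== SOURCE A (Python) =====
-- def process_clip_opinions(opinion_str, max_length=140):
--     opinions = opinion_str.split(", ")
--     truncated_opinions = []
--     current_length = 0
--
--     for opinion in opinions:
--         if current_length + len(opinion) + 2 > max_length:  # +2 for comma and space
--             break
--         truncated_opinions.append(opinion)
--         current_length += len(opinion) + 2
--
--     return truncated_opinions
-- ===== SOURCE B (Python) =====
-- def process_clip_opinions(opinion_str, max_length=140):
--     opinions = opinion_str.split(", ")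
--     # inclusive prefix-sum table of weights len(o) + 2
--     cum = []
--     total = 0
--     for o in opinions:
--         total += len(o) + 2
--         cum.append(total)
--     # first index whose cumulative weight exceeds max_length; slice up to it
--     k = len(opinions)
--     for i, c in enumerate(cum):
--         if c > max_length:
--             k = i
--             break
--     return opinions[:k]
-- ===== Notes on version B (the rewrite author's own statement) =====
-- stated objective: alternative
-- what changed: Replaces the fused accumulate-and-break loop with an inclusive cumulative-weight prefix table followed by a first-exceed index search and a slice of the opinion list.
import Mathlib
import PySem

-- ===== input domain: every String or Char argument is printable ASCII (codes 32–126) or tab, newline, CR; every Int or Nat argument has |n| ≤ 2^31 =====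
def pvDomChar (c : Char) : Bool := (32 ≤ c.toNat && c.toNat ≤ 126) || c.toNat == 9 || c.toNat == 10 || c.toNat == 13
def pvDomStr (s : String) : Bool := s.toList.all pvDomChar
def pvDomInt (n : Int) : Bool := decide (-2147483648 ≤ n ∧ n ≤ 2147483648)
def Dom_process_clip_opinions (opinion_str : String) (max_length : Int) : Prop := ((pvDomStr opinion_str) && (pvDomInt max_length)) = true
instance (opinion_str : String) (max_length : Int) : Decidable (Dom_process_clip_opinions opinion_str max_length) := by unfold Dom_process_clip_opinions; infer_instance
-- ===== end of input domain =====

-- B replaces A's fused accumulate-and-break loop by a cumulative prefix table,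
-- a first-exceed index search, and a slice (objective: alternative decomposition).

-- ===== PORT A =====
-- the for-loop with break and running current_length, as structural recursion
def pcoA_loop (max_length : Int) : List String → Int → List String
  | [], _ => []
  | o :: rest, cur =>
    if cur + PySem.Str.len o + 2 > max_length then []
    else o :: pcoA_loop max_length rest (cur + PySem.Str.len o + 2)

def process_clip_opinions (opinion_str : String) (max_length : Int) : List String :=
  pcoA_loop max_length (((PySem.Str.split? opinion_str ", ").getD [])) 0

-- ===== PORT B =====
-- inclusive prefix sums of the weights len(o) + 2
def pcoB_cum : List String → Int → List Int
  | [], _ => []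
  | o :: rest, t => (t + PySem.Str.len o + 2) :: pcoB_cum rest (t + PySem.Str.len o + 2)

-- index of the first cumulative weight exceeding max_length (length if none)
def pcoB_firstExceed (max_length : Int) : List Int → Nat
  | [] => 0
  | c :: rest => if c > max_length then 0 else pcoB_firstExceed max_length rest + 1

def process_clip_opinions_alt (opinion_str : String) (max_length : Int) : List String :=
  let opinions := ((PySem.Str.split? opinion_str ", ").getD [])
  List.take (pcoB_firstExceed max_length (pcoB_cum opinions 0)) opinions

-- ===== PRECONDITION & SPEC =====
def Spec_process_clip_opinions (opinion_str : String) (max_length : Int) (out : List String) : Prop := out = process_clip_opinions_alt opinion_str max_length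
instance (opinion_str : String) (max_length : Int) (out : List String) : Decidable (Spec_process_clip_opinions opinion_str max_length out) := by unfold Spec_process_clip_opinions; infer_instance

-- ===== CLAIM (what is proved, stated in full; the proofs are below) =====
def Claim_equal_process_clip_opinions : Prop := ∀ (opinion_str : String) (max_length : Int), Dom_process_clip_opinions opinion_str max_length → Spec_process_clip_opinions opinion_str max_length (process_clip_opinions opinion_str max_length)

-- ===== LEMMAS AND PROOFS =====
theorem pcoA_eq_take (max_length : Int) (xs : List String) (cur : Int) :
    pcoA_loop max_length xs cur =
      List.take (pcoB_firstExceed max_length (pcoB_cum xs cur)) xs := by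
  induction xs generalizing cur with
  | nil => simp [pcoA_loop, pcoB_cum, pcoB_firstExceed]
  | cons o rest ih =>
    simp only [pcoA_loop, pcoB_cum, pcoB_firstExceed]
    split_ifs with h
    · simp
    · simp [ih]

-- ===== VERDICT (by name: the statement is the Claim_ definition above) =====
theorem process_clip_opinions_spec : Claim_equal_process_clip_opinions := by
  intro s m _
  unfold Spec_process_clip_opinions process_clip_opinions process_clip_opinions_alt
  exact pcoA_eq_take m _ 0
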